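-- pv_equiv track=rewrite | github.com/gogalexandra/University | 1st year/First Semester/FP/WrittenExam/problem_3.py | dcsum
-- ===== SOURCE A (Python) =====
-- def dcsum(l, r, list):
--     """
--     @param l: left boundary of the list
--     @param r: right boundary of the list
--     @param list: list of numbers
--     @return: the product of the required numbers, 0 if no good numbers found
--     """
--     # if len(list) < 3
--     # 1 number -> return 1 or itself, depending on eveness
--     # 2 numbers -> return from even position or 1
--     if l >= r:
--         # base case
--         # basically if we get to a list formed by a single element we check
--         # if the requirements are met and add it to the product
--         if r % 2 == 0 and list[r] % 2 == 0:
--             return list[r]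
--         else:
--             return 0
--     else:
--         mid = (l + r) // 2
--         result = dcsum(mid + 1, r, list) + dcsum(l, mid, list)
--         # divide the list into two parts in the middle, add to the product the results gained from the respective parts
--         return result
-- ===== SOURCE B (Python) =====
-- def dcsum(l, r, list):
--     s = 0
--     for i in range(l, r + 1):
--         if i % 2 == 0 and list[i] % 2 == 0:
--             s += list[i]
--     return s
-- ===== Notes on version B (the rewrite author's own statement) =====
-- stated objective: simpler
-- what changed: Replaces the divide-and-conquer recursion (split at mid, recurse on both halves) by a single flat loop over range(l, r+1) accumulating the qualifying elements.
-- intended difference: On calls with l > r, A's base case still inspects list[r] and returns list[r] when r is even and list[r] is even and nonzero, while B's empty-range loop returns 0, the intended sum of an empty segment. — e.g. on dcsum(2, 0, [2]): A returns 2, B returns 0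
import Mathlib
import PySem

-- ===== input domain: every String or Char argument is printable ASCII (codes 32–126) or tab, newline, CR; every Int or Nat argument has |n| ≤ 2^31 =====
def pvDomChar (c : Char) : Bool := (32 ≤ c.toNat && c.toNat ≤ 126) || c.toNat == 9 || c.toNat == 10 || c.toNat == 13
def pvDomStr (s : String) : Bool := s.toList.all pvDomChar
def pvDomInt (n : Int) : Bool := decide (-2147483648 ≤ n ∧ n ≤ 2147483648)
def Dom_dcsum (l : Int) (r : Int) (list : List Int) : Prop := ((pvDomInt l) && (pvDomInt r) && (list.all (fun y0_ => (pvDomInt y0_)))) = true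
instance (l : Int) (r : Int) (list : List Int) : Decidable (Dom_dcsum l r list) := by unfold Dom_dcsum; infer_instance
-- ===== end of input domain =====

-- B replaces A's divide-and-conquer recursion by a single flat loop over [l, r]; same cost, simpler.


-- ===== PORT A =====
-- literal transliteration of A's recursion; list[…] is PySem.List.pyGetD, total under Pre_
def dcsum (l : Int) (r : Int) (list : List Int) : Int :=
  if l ≥ r then
    if PySem.Int.mod r 2 = 0 ∧ PySem.Int.mod (PySem.List.pyGetD list r 0) 2 = 0 then
      PySem.List.pyGetD list r 0
    else 0
  else
    let mid := PySem.Int.floordiv (l + r) 2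
    dcsum (mid + 1) r list + dcsum l mid list
termination_by (r - l).toNat
decreasing_by
  · have h1 : l ≤ PySem.Int.floordiv (l + r) 2 := by
      rw [PySem.Int.le_floordiv_iff_mul_le (by omega)]; omega
    omega
  · have h2 : PySem.Int.floordiv (l + r) 2 < r := by
      rw [PySem.Int.floordiv_lt_iff_lt_mul (by omega)]; omega
    omega

-- ===== PORT B =====
-- literal transliteration of Source B: s = 0; for i in range(l, r+1): if i%2==0 and list[i]%2==0: s += list[i]
def dcsum_alt (l : Int) (r : Int) (list : List Int) : Int :=
  (PySem.List.pyRange l (r + 1) 1).foldl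
    (fun s i =>
      if PySem.Int.mod i 2 = 0 ∧ PySem.Int.mod (PySem.List.pyGetD list i 0) 2 = 0 then
        s + PySem.List.pyGetD list i 0
      else s) 0

-- ===== PRECONDITION & SPEC =====
-- Pre_ excludes exactly the inputs on which Python A raises IndexError: the 'and' short-circuits,
-- so A reads list[i] only at the EVEN indices i it visits — all even i in [l, r] when l ≤ r,
-- and i = r alone (if even) when l > r; each such index must be a valid Python index.
def Pre_dcsum (l : Int) (r : Int) (list : List Int) : Prop :=
  if r < l then (2 ∣ r → PySem.Raise.InRange list.length r)
  else ((if 2 ∣ l then l else l + 1) ≤ (if 2 ∣ r then r else r - 1) →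
    PySem.Raise.InRange list.length (if 2 ∣ l then l else l + 1) ∧
    PySem.Raise.InRange list.length (if 2 ∣ r then r else r - 1))
instance (l : Int) (r : Int) (list : List Int) : Decidable (Pre_dcsum l r list) := by
  unfold Pre_dcsum; infer_instance
def pvWitness_dcsum : Int × Int × List Int := (0, 3, [2, 3, 4, 5])

-- closed-form 'the element of list at Python index r' (negative r counts from the end), for D_ only
def pyAt (list : List Int) (r : Int) : Int :=
  if 0 ≤ r then list.getD r.toNat 0 else list.getD (list.length - (-r).toNat) 0

-- On calls with l > r, A's base case still inspects list[r] and returns list[r] when r is even and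
-- list[r] is even and nonzero, while B's empty-range loop returns 0, the intended sum of an empty segment.
def D_dcsum (l : Int) (r : Int) (list : List Int) : Prop :=
  r < l ∧ 2 ∣ r ∧ 2 ∣ pyAt list r ∧ pyAt list r ≠ 0
instance (l : Int) (r : Int) (list : List Int) : Decidable (D_dcsum l r list) := by
  unfold D_dcsum; infer_instance

def Spec_dcsum (l : Int) (r : Int) (list : List Int) (out : Int) : Prop :=
  ¬ D_dcsum l r list → out = dcsum_alt l r list
instance (l : Int) (r : Int) (list : List Int) (out : Int) : Decidable (Spec_dcsum l r list out) := by
  unfold Spec_dcsum; infer_instance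

def pvDiffWitness_dcsum : Int × Int × List Int := (2, 0, [2])
def pvDiffWitnessOut_dcsum : Int × Int := (2, 0)

-- ===== CLAIM (what is proved, stated in full; the proofs are below) =====
def Claim_unchanged_dcsum : Prop := ∀ (l : Int) (r : Int) (list : List Int),
  Dom_dcsum l r list → Pre_dcsum l r list → Spec_dcsum l r list (dcsum l r list)
def Claim_changed_dcsum : Prop :=
  Dom_dcsum (pvDiffWitness_dcsum.1) (pvDiffWitness_dcsum.2.1) (pvDiffWitness_dcsum.2.2) ∧
  Pre_dcsum (pvDiffWitness_dcsum.1) (pvDiffWitness_dcsum.2.1) (pvDiffWitness_dcsum.2.2) ∧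
  D_dcsum (pvDiffWitness_dcsum.1) (pvDiffWitness_dcsum.2.1) (pvDiffWitness_dcsum.2.2) ∧
  dcsum (pvDiffWitness_dcsum.1) (pvDiffWitness_dcsum.2.1) (pvDiffWitness_dcsum.2.2) = pvDiffWitnessOut_dcsum.1 ∧
  dcsum_alt (pvDiffWitness_dcsum.1) (pvDiffWitness_dcsum.2.1) (pvDiffWitness_dcsum.2.2) = pvDiffWitnessOut_dcsum.2 ∧
  pvDiffWitnessOut_dcsum.1 ≠ pvDiffWitnessOut_dcsum.2
def Claim_exact_dcsum : Prop := ∀ (l : Int) (r : Int) (list : List Int),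
  Dom_dcsum l r list → Pre_dcsum l r list → D_dcsum l r list → dcsum l r list ≠ dcsum_alt l r list

-- ===== LEMMAS AND PROOFS =====

-- the per-index contribution
def dcg (list : List Int) (i : Int) : Int :=
  if PySem.Int.mod i 2 = 0 ∧ PySem.Int.mod (PySem.List.pyGetD list i 0) 2 = 0 then
    PySem.List.pyGetD list i 0
  else 0

theorem foldl_if_add (list : List Int) (xs : List Int) (a : Int) :
    xs.foldl (fun s i =>
      if PySem.Int.mod i 2 = 0 ∧ PySem.Int.mod (PySem.List.pyGetD list i 0) 2 = 0 then
        s + PySem.List.pyGetD list i 0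
      else s) a = a + (xs.map (dcg list)).sum := by
  induction xs generalizing a with
  | nil => simp
  | cons x xs ih =>
    simp only [List.foldl_cons, List.map_cons, List.sum_cons, ih, dcg]
    split_ifs <;> ring

theorem dcsum_alt_eq_sum (l r : Int) (list : List Int) :
    dcsum_alt l r list = ((PySem.List.pyRange l (r + 1) 1).map (dcg list)).sum := by
  unfold dcsum_alt
  rw [foldl_if_add]
  ring

theorem dcsum_eq_sum (n : Nat) (l r : Int) (list : List Int)
    (hn : (r - l).toNat = n) (hlr : l ≤ r) :
    dcsum l r list = ((PySem.List.pyRange l (r + 1) 1).map (dcg list)).sum := by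
  induction n using Nat.strong_induction_on generalizing l r with
  | _ n ih =>
    rcases lt_or_eq_of_le hlr with hlt | heq
    · -- l < r : recursive case
      have h1 : l ≤ PySem.Int.floordiv (l + r) 2 := by
        rw [PySem.Int.le_floordiv_iff_mul_le (by omega)]; omega
      have h2 : PySem.Int.floordiv (l + r) 2 < r := by
        rw [PySem.Int.floordiv_lt_iff_lt_mul (by omega)]; omega
      set mid := PySem.Int.floordiv (l + r) 2 with hmid
      have key : dcsum l r list = dcsum (mid + 1) r list + dcsum l mid list := by
        rw [dcsum, if_neg (not_le.mpr hlt)]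
      rw [key]
      have ihL := ih (mid - l).toNat (by omega) l mid rfl (by omega)
      have ihR := ih (r - (mid + 1)).toNat (by omega) (mid + 1) r rfl (by omega)
      rw [ihL, ihR,
        PySem.List.pyRange_one_append l (mid + 1) (r + 1) (by omega) (by omega),
        List.map_append, List.sum_append]
      ring
    · -- l = r : base case
      subst heq
      rw [dcsum]
      simp only [ge_iff_le, le_refl, if_pos]
      rw [PySem.List.pyRange_one_singleton]
      simp [dcg]

-- under Pre_'s in-range hypothesis, pyAt agrees with the ports' Python indexing
theorem pyAt_eq (list : List Int) (r : Int) (h : PySem.Raise.InRange list.length r) :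
    pyAt list r = PySem.List.pyGetD list r 0 := by
  have h' : -(list.length : Int) ≤ r ∧ r < list.length := by
    simpa [PySem.Raise.InRange] using h
  unfold pyAt
  by_cases h0 : 0 ≤ r
  · rw [if_pos h0, PySem.List.pyGetD_eq_getElem list 0 h0 h'.2,
      List.getD_eq_getElem _ _ (by omega : r.toNat < list.length)]
  · have hk : r = -(((-r).toNat : Nat) : Int) := by omega
    rw [if_neg h0, hk,
      PySem.List.pyGetD_neg_natCast list (-r).toNat 0 (by omega) (by omega)]
    simp only [neg_neg, Int.toNat_natCast]
    rw [List.getD_eq_getElem _ _ (by omega : list.length - (-r).toNat < list.length)]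

theorem mod_two_zero_iff (a : Int) : PySem.Int.mod a 2 = 0 ↔ 2 ∣ a :=
  PySem.Int.mod_eq_zero_iff_dvd a 2

theorem dcsum_spec : Claim_unchanged_dcsum := by
  intro l r list _ hpre hnD
  by_cases hlr : l ≤ r
  · rw [dcsum_eq_sum (r - l).toNat l r list rfl hlr, dcsum_alt_eq_sum]
  · -- empty segment: B returns 0; ¬D forces A's base case to 0 as well
    have hrl : r < l := by omega
    have halt : dcsum_alt l r list = 0 := by
      rw [dcsum_alt_eq_sum, PySem.List.pyRange_one_eq_nil (by omega)]; rfl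
    rw [halt, dcsum]
    rw [if_pos (by omega : l ≥ r)]
    split_ifs with hc
    · by_contra hne
      have hinr : PySem.Raise.InRange list.length r := by
        unfold Pre_dcsum at hpre
        rw [if_pos hrl] at hpre
        exact hpre ((mod_two_zero_iff r).mp hc.1)
      refine hnD ⟨hrl, (mod_two_zero_iff r).mp hc.1, ?_, ?_⟩
      · rw [pyAt_eq list r hinr]; exact (mod_two_zero_iff _).mp hc.2
      · rw [pyAt_eq list r hinr]; exact hne
    · rfl

theorem dcsum_changed : Claim_changed_dcsum := by
  unfold Claim_changed_dcsum
  refine ⟨by decide, by decide, by decide, ?_, by decide, by decide⟩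
  show dcsum 2 0 [2] = 2
  rw [dcsum]
  decide

theorem dcsum_tight : Claim_exact_dcsum := by
  intro l r list _ hpre hD
  obtain ⟨hrl, h1, h2, h3⟩ := hD
  have hinr : PySem.Raise.InRange list.length r := by
    unfold Pre_dcsum at hpre
    rw [if_pos hrl] at hpre
    exact hpre h1
  rw [pyAt_eq list r hinr] at h2 h3
  have halt : dcsum_alt l r list = 0 := by
    rw [dcsum_alt_eq_sum, PySem.List.pyRange_one_eq_nil (by omega)]; rfl
  rw [halt, dcsum, if_pos (by omega : l ≥ r),
    if_pos ⟨(mod_two_zero_iff r).mpr h1, (mod_two_zero_iff _).mpr h2⟩]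
  exact h3
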